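-- pv_equiv track=rewrite | github.com/mutwo-org/mutwo.core | mutwo/generators/toussaint/reflection_rhythms.py | paradiddle
-- ===== SOURCE A (Python) =====
-- import itertools
-- import typing
--
-- def _mirror(pattern: typing.Tuple[bool]) -> typing.Tuple[bool]:
--     """Inverse every boolean value inside the tuple.
--
--     Helper function for other functions.
--     """
--     return tuple(False if item else True for item in pattern)
--
-- def paradiddle(size: int) -> typing.Tuple[typing.Tuple[int]]:
--     """Generates rhythm using the paraddidle method described by G. T. Toussaint.
--
--     :param size: how many beats the resulting rhythm shall last. 'Size' has to be
--         divisible by 2 because of the symmetrical structure of the generated rhythm.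
--
--     :return: Return nested tuple that contains two tuple where each tuple represents
--         one rhythm (both rhythms are complementary to each other). The rhythms are
--         encoded in absolute time values.
--
--     The paradiddle algorithm has been descriped by Godfried T. Toussaint
--     in his paper 'Generating “Good” Musical Rhythms Algorithmically'.
--     """
--
--     def convert_to_right_left_pattern(pattern: tuple) -> tuple:
--         right = []
--         left = []
--         for idx, item in enumerate(pattern):
--             if item:
--                 right.append(idx)
--             else:
--                 left.append(idx)
--         return tuple(right), tuple(left)
--
--     # check for correct size value
--     try:
--         assert size % 2 == 0 and size > 2
--     except AssertionError:
--         message = (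
--             "Invalid value '{}' for argument 'size'. 'Size' has to be divisible by 2"
--             " and has to be bigger than 2.".format(size)
--         )
--         raise ValueError(message)
--
--     cycle = itertools.cycle((True, False))
--     pattern = list(next(cycle) for n in range(size // 2))
--     pattern[-1] = pattern[-2]
--     return convert_to_right_left_pattern(tuple(pattern) + _mirror(pattern))
-- ===== SOURCE B (Python) =====
-- def paradiddle(size: int):
--     """Closed-form reimplementation: builds only the half pattern's index sets
--     with step-2 ranges and derives the mirrored second half arithmetically."""
--     if size % 2 != 0 or size <= 2:
--         message = (
--             "Invalid value '{}' for argument 'size'. 'Size' has to be divisible by 2"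
--             " and has to be bigger than 2.".format(size)
--         )
--         raise ValueError(message)
--     h = size // 2
--     half_right = list(range(0, h - 1, 2))
--     half_left = list(range(1, h - 1, 2))
--     # the overridden last slot of the half pattern is a hit iff h is even
--     (half_right if h % 2 == 0 else half_left).append(h - 1)
--     right = tuple(half_right) + tuple(i + h for i in half_left)
--     left = tuple(half_left) + tuple(i + h for i in half_right)
--     return right, left
-- ===== Notes on version B (the rewrite author's own statement) =====
-- stated objective: alternative
-- what changed: Instead of materialising the full boolean pattern (half + mirrored half) and scanning it element by element to classify indices, B computes the hit/rest index lists of the half pattern directly as step-2 arithmetic ranges (with the last slot assigned by the parity of size//2) and obtains the mirrored second half by the complement symmetry right = half_right + (half_left + h), left = half_left + (half_right + h).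
import Mathlib
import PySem

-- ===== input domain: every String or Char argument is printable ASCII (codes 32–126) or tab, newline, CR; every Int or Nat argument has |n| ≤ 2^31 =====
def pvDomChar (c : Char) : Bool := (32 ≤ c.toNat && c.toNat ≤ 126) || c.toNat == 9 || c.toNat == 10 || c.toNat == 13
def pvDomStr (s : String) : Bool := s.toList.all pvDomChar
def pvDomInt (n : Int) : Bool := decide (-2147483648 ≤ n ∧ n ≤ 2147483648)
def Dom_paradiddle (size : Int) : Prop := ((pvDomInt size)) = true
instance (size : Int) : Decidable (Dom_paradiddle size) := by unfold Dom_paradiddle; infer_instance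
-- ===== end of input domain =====

-- B builds only the half pattern's hit/rest index lists as step-2 ranges and mirrors them
-- arithmetically, instead of materialising and scanning the full boolean pattern (objective: alternative).

-- ===== PORT A =====
def paradiddle (size : Int) : List Int × List Int :=
  -- pattern = list(next(cycle) for n in range(size // 2)), cycle = itertools.cycle((True, False))
  let pattern := ((PySem.List.pyRange 0 (PySem.Int.floordiv size 2) 1).foldl
      (fun (s : Bool × List Bool) _ => (!s.1, s.2 ++ [s.1])) (true, [])).2
  -- pattern[-1] = pattern[-2]
  let pattern := PySem.List.pySetD pattern (-1) (PySem.List.pyGetD pattern (-2) true)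
  -- tuple(pattern) + _mirror(pattern)
  let full := pattern ++ pattern.map (fun b => !b)
  -- convert_to_right_left_pattern
  (PySem.List.enumerate full 0).foldl
    (fun (rl : List Int × List Int) p =>
      if p.2 then (rl.1 ++ [p.1], rl.2) else (rl.1, rl.2 ++ [p.1]))
    ([], [])

-- ===== PORT B =====
def paradiddle_alt (size : Int) : List Int × List Int :=
  let h := PySem.Int.floordiv size 2
  let hr0 := PySem.List.pyRange 0 (h - 1) 2
  let hl0 := PySem.List.pyRange 1 (h - 1) 2
  -- (half_right if h % 2 == 0 else half_left).append(h - 1)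
  let hr := if PySem.Int.mod h 2 = 0 then hr0 ++ [h - 1] else hr0
  let hl := if PySem.Int.mod h 2 = 0 then hl0 else hl0 ++ [h - 1]
  (hr ++ hl.map (· + h), hl ++ hr.map (· + h))

-- ===== PRECONDITION & SPEC =====
-- Pre_ excludes exactly the sizes (odd or ≤ 2) on which A raises ValueError (B raises the same error).
def Pre_paradiddle (size : Int) : Prop := PySem.Int.mod size 2 = 0 ∧ 2 < size
instance (size : Int) : Decidable (Pre_paradiddle size) := by unfold Pre_paradiddle; infer_instance
def pvWitness_paradiddle : Int := (8)

def Spec_paradiddle (size : Int) (out : List Int × List Int) : Prop := out = paradiddle_alt size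
instance (size : Int) (out : List Int × List Int) : Decidable (Spec_paradiddle size out) := by unfold Spec_paradiddle; infer_instance

-- ===== CLAIM (what is proved, stated in full; the proofs are below) =====
def Claim_equal_paradiddle : Prop := ∀ (size : Int), Dom_paradiddle size → Pre_paradiddle size → Spec_paradiddle size (paradiddle size)

-- ===== LEMMAS AND PROOFS =====

-- proof-only helpers
def altList (b : Bool) : Nat → List Bool
  | 0 => []
  | n + 1 => b :: altList (!b) n

def idxT : Int → List Bool → List Int
  | _, [] => []
  | s, b :: bs => if b then s :: idxT (s + 1) bs else idxT (s + 1) bs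

def idxF : Int → List Bool → List Int
  | _, [] => []
  | s, b :: bs => if b then idxF (s + 1) bs else s :: idxF (s + 1) bs

def fHalf (i : Nat) : Bool := if i % 2 = 0 then true else false

theorem foldl_alt (l : List Int) (b : Bool) (acc : List Bool) :
    (l.foldl (fun (s : Bool × List Bool) _ => (!s.1, s.2 ++ [s.1])) (b, acc)).2
      = acc ++ altList b l.length := by
  induction l generalizing b acc with
  | nil => simp [altList]
  | cons x xs ih =>
      simp only [List.foldl_cons]
      rw [ih]
      simp [altList]

theorem altList_eq (n : Nat) (b : Bool) :
    altList b n = (List.range n).map (fun i => if i % 2 = 0 then b else !b) := by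
  induction n generalizing b with
  | zero => simp [altList]
  | succ n ih =>
      rw [altList, ih, List.range_succ_eq_map, List.map_cons, List.map_map]
      simp only [Nat.zero_mod]
      congr 1
      apply List.map_congr_left
      intro i _
      simp only [Function.comp]
      rcases Nat.even_or_odd i with h | h
      · have h1 : i % 2 = 0 := Nat.even_iff.mp h
        have h2 : Nat.succ i % 2 ≠ 0 := by omega
        simp [h1, h2]
      · have h1 : i % 2 ≠ 0 := by have := Nat.odd_iff.mp h; omega
        have h2 : Nat.succ i % 2 = 0 := by have := Nat.odd_iff.mp h; omega
        simp [h1, h2]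

theorem part_fold (xs : List Bool) (s : Int) (r l : List Int) :
    (PySem.List.enumerate xs s).foldl
      (fun (rl : List Int × List Int) p =>
        if p.2 then (rl.1 ++ [p.1], rl.2) else (rl.1, rl.2 ++ [p.1])) (r, l)
      = (r ++ idxT s xs, l ++ idxF s xs) := by
  induction xs generalizing s r l with
  | nil => simp [PySem.List.enumerate_nil, idxT, idxF]
  | cons b bs ih =>
      rw [PySem.List.enumerate_cons, List.foldl_cons]
      cases b with
      | true => simp [ih, idxT, idxF]
      | false => simp [ih, idxT, idxF]

theorem idxT_append (xs ys : List Bool) (s : Int) :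
    idxT s (xs ++ ys) = idxT s xs ++ idxT (s + xs.length) ys := by
  induction xs generalizing s with
  | nil => simp [idxT]
  | cons b bs ih =>
      cases b <;> simp [idxT, ih] <;> ring_nf

theorem idxF_append (xs ys : List Bool) (s : Int) :
    idxF s (xs ++ ys) = idxF s xs ++ idxF (s + xs.length) ys := by
  induction xs generalizing s with
  | nil => simp [idxF]
  | cons b bs ih =>
      cases b <;> simp [idxF, ih] <;> ring_nf

theorem idxT_not (xs : List Bool) (s : Int) :
    idxT s (xs.map (fun b => !b)) = idxF s xs := by
  induction xs generalizing s with
  | nil => rfl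
  | cons b bs ih => cases b <;> simp [idxT, idxF, ih]

theorem idxF_not (xs : List Bool) (s : Int) :
    idxF s (xs.map (fun b => !b)) = idxT s xs := by
  induction xs generalizing s with
  | nil => rfl
  | cons b bs ih => cases b <;> simp [idxT, idxF, ih]

theorem idxT_shift (xs : List Bool) (s t : Int) :
    idxT (s + t) xs = (idxT s xs).map (· + t) := by
  induction xs generalizing s with
  | nil => rfl
  | cons b bs ih =>
      cases b <;> simp only [idxT, if_true, Bool.false_eq_true, if_false, List.map_cons] <;>
        rw [show s + t + 1 = (s + 1) + t by ring, ih]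

theorem idxF_shift (xs : List Bool) (s t : Int) :
    idxF (s + t) xs = (idxF s xs).map (· + t) := by
  induction xs generalizing s with
  | nil => rfl
  | cons b bs ih =>
      cases b <;> simp only [idxF, if_true, Bool.false_eq_true, if_false, List.map_cons] <;>
        rw [show s + t + 1 = (s + 1) + t by ring, ih]

theorem evens_closed (n : Nat) :
    idxT 0 ((List.range n).map fHalf) = (List.range ((n + 1) / 2)).map (fun k : Nat => (2 * k : Int)) := by
  induction n with
  | zero => rfl
  | succ n ih =>
      rw [List.range_succ, List.map_append, idxT_append, ih, List.length_map, List.length_range]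
      by_cases hp : n % 2 = 0
      · have h1 : (n + 1 + 1) / 2 = (n + 1) / 2 + 1 := by omega
        rw [h1, List.range_succ, List.map_append]
        congr 1
        simp [idxT, fHalf, hp]
        omega
      · have h1 : (n + 1 + 1) / 2 = (n + 1) / 2 := by omega
        rw [h1]
        simp [idxT, fHalf, hp]

theorem odds_closed (n : Nat) :
    idxF 0 ((List.range n).map fHalf) = (List.range (n / 2)).map (fun k : Nat => (1 + 2 * k : Int)) := by
  induction n with
  | zero => rfl
  | succ n ih =>
      rw [List.range_succ, List.map_append, idxF_append, ih, List.length_map, List.length_range]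
      by_cases hp : n % 2 = 0
      · have h1 : (n + 1) / 2 = n / 2 := by omega
        rw [h1]
        simp [idxF, fHalf, hp]
      · have h1 : (n + 1) / 2 = n / 2 + 1 := by omega
        rw [h1, List.range_succ, List.map_append]
        congr 1
        simp [idxF, fHalf, hp]
        omega

theorem pyRange0_two (n : Nat) :
    PySem.List.pyRange 0 (n : Int) 2 = (List.range ((n + 1) / 2)).map (fun k : Nat => (2 * k : Int)) := by
  rw [PySem.List.pyRange_of_pos 0 (n : Int) (by norm_num)]
  have hc : (if (0 : Int) < (n : Int) then (((n : Int) - 0 + 2 - 1) / 2).toNat else 0) = (n + 1) / 2 := by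
    split <;> omega
  rw [hc]
  simp

theorem pyRange1_two (n : Nat) :
    PySem.List.pyRange 1 (n : Int) 2 = (List.range (n / 2)).map (fun k : Nat => (1 + 2 * k : Int)) := by
  rw [PySem.List.pyRange_of_pos 1 (n : Int) (by norm_num)]
  have hc : (if (1 : Int) < (n : Int) then (((n : Int) - 1 + 2 - 1) / 2).toNat else 0) = n / 2 := by
    split <;> omega
  rw [hc]

theorem set_append_length {α : Type} (xs : List α) (x v : α) :
    (xs ++ [x]).set xs.length v = xs ++ [v] := by
  induction xs with
  | nil => rfl
  | cons y ys ih => simp [ih]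

theorem pySetD_neg_one {α : Type} (xs : List α) (v : α) (h : xs ≠ []) :
    PySem.List.pySetD xs (-1) v = xs.set (xs.length - 1) v := by
  have hlen : 0 < xs.length := List.length_pos_of_ne_nil h
  simp only [PySem.List.pySetD, PySem.List.pySet?, PySem.List.pyIdx?]
  have h1 : ¬ (0:Int) ≤ -1 := by omega
  have h2 : -(xs.length : Int) ≤ -1 := by omega
  simp [h2]

-- ===== VERDICT (by name: the statement is the Claim_ definition above) =====
theorem main_m (m : Nat) (hm2 : 2 ≤ m) :
    paradiddle (2 * (m : Int)) = paradiddle_alt (2 * (m : Int)) := by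
  have hfd : PySem.Int.floordiv (2 * (m : Int)) 2 = (m : Int) := by
    rw [PySem.Int.floordiv_eq_ediv_of_pos (by norm_num)]
    omega
  have hm1 : ((m - 1 : Nat) : Int) = (m : Int) - 1 := by omega
  have hlenR : (PySem.List.pyRange 0 (m : Int) 1).length = m := by
    rw [PySem.List.length_pyRange_one]
    omega
  have hpat : ((PySem.List.pyRange 0 (m : Int) 1).foldl
      (fun (s : Bool × List Bool) _ => (!s.1, s.2 ++ [s.1])) (true, [])).2
      = (List.range m).map fHalf := by
    rw [foldl_alt, hlenR, altList_eq]
    simp [fHalf]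
  have hsplit : (List.range m).map fHalf = (List.range (m - 1)).map fHalf ++ [fHalf (m - 1)] := by
    conv_lhs => rw [show m = (m - 1) + 1 from by omega]
    rw [List.range_succ, List.map_append, List.map_singleton]
  have hlenP : ((List.range m).map fHalf).length = m := by simp
  have hget : PySem.List.pyGetD ((List.range m).map fHalf) (-2) true = fHalf (m - 2) := by
    rw [PySem.List.pyGetD_neg_ofNat _ 2 _ (by omega) (by rw [hlenP]; omega)]
    simp [hlenP]
  have hset : PySem.List.pySetD ((List.range m).map fHalf) (-1) (fHalf (m - 2))
      = (List.range (m - 1)).map fHalf ++ [fHalf (m - 2)] := by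
    rw [pySetD_neg_one _ _ (by rw [← List.length_pos_iff, hlenP]; omega), hlenP, hsplit]
    have h2 := set_append_length ((List.range (m - 1)).map fHalf) (fHalf (m - 1)) (fHalf (m - 2))
    simp only [List.length_map, List.length_range] at h2
    exact h2
  set p' : List Bool := (List.range (m - 1)).map fHalf ++ [fHalf (m - 2)] with hp'
  have hlenp' : p'.length = m := by
    rw [hp']
    simp
    omega
  simp only [paradiddle, paradiddle_alt, hfd, hpat, hget, hset]
  rw [part_fold]
  simp only [List.nil_append]
  rw [idxT_append, idxF_append, idxT_not, idxF_not, hlenp']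
  rw [idxF_shift p' 0 (m : Int), idxT_shift p' 0 (m : Int)]
  -- index lists of the half pattern
  have hT : idxT 0 p' = (List.range ((m - 1 + 1) / 2)).map (fun k : Nat => (2 * k : Int))
      ++ (if fHalf (m - 2) then [((m - 1 : Nat) : Int)] else []) := by
    rw [hp', idxT_append, evens_closed]
    simp only [List.length_map, List.length_range, idxT]
    split <;> simp
  have hF : idxF 0 p' = (List.range ((m - 1) / 2)).map (fun k : Nat => (1 + 2 * k : Int))
      ++ (if fHalf (m - 2) then [] else [((m - 1 : Nat) : Int)]) := by
    rw [hp', idxF_append, odds_closed]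
    simp only [List.length_map, List.length_range, idxF]
    split <;> simp
  rw [hT, hF]
  rw [← hm1, pyRange0_two, pyRange1_two]
  by_cases hpar : m % 2 = 0
  · have hf : fHalf (m - 2) = true := by simp [fHalf]; omega
    have hd : (2 : Int) ∣ (m : Int) := by omega
    simp [hf, hd, hm1, List.map_map]
  · have hf : fHalf (m - 2) = false := by simp [fHalf]; omega
    have hd : ¬ (2 : Int) ∣ (m : Int) := by omega
    simp [hf, hd, hm1, List.map_map]

theorem paradiddle_spec : Claim_equal_paradiddle := by
  intro size _ hpre
  obtain ⟨hmod, hgt⟩ := hpre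
  obtain ⟨k, hk⟩ := (PySem.Int.mod_eq_zero_iff_dvd size 2).mp hmod
  have hkm : k = ((k.toNat : Nat) : Int) := by omega
  have hm2 : 2 ≤ k.toNat := by omega
  show paradiddle size = paradiddle_alt size
  rw [hk, hkm]
  exact main_m k.toNat hm2
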